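-- pv_equiv track=rewrite | github.com/lomnom/FUNC | FUNCTIONS.py | flipColumn
-- ===== SOURCE A (Python) =====
-- def flipColumn(column,image):
-- 	col=[0,0,0,0,0]
-- 	for row in range(0,5):
-- 		col[row]=image[row][column]
-- 	col.reverse()
-- 	for row in range(0,5):
-- 		image[row][column]=col[row]
-- 	return image
-- ===== SOURCE B (Python) =====
-- def flipColumn(column, image):
-- 	for i in range(2):
-- 		image[i][column], image[4 - i][column] = image[4 - i][column], image[i][column]
-- 	return image
-- ===== Notes on version B (the rewrite author's own statement) =====
-- stated objective: simpler
-- what changed: Replaces the copy-column/reverse/write-back three-phase loop by an in-place two-pointer swap of rows 0<->4 and 1<->3, with no auxiliary list and no reverse().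
import Mathlib
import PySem

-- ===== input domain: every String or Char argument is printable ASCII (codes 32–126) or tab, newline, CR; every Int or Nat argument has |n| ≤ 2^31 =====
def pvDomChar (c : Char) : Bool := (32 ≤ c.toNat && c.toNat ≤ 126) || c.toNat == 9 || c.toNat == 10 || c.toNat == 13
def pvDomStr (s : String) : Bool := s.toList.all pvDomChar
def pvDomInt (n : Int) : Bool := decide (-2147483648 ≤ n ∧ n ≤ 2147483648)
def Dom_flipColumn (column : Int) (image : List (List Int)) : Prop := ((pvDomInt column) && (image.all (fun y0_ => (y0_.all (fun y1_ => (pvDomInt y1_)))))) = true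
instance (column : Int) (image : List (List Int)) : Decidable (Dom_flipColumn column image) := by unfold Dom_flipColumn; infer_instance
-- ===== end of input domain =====

-- B replaces A's copy-column/reverse/write-back scheme by an in-place two-pointer swap of
-- rows 0<->4 and 1<->3 (simpler, no auxiliary list); in Python both A and B mutate `image`
-- in place to the same final state, and the equivalence proved here is about the return value.

-- ===== PORT A =====
def flipColumn (column : Int) (image : List (List Int)) : List (List Int) :=
  let col : List Int := [0, 0, 0, 0, 0]
  let col := (PySem.List.pyRange 0 5 1).foldl
    (fun col row =>
      PySem.List.pySetD col row (PySem.List.pyGetD (PySem.List.pyGetD image row []) column 0))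
    col
  let col := col.reverse
  (PySem.List.pyRange 0 5 1).foldl
    (fun img row =>
      PySem.List.pySetD img row
        (PySem.List.pySetD (PySem.List.pyGetD img row []) column (PySem.List.pyGetD col row 0)))
    image

-- ===== PORT B =====
def flipColumn_alt (column : Int) (image : List (List Int)) : List (List Int) :=
  (PySem.List.pyRange 0 2 1).foldl
    (fun img i =>
      -- image[i][column], image[4-i][column] = image[4-i][column], image[i][column]
      let a := PySem.List.pyGetD (PySem.List.pyGetD img (4 - i) []) column 0
      let b := PySem.List.pyGetD (PySem.List.pyGetD img i []) column 0
      let img := PySem.List.pySetD img i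
        (PySem.List.pySetD (PySem.List.pyGetD img i []) column a)
      PySem.List.pySetD img (4 - i)
        (PySem.List.pySetD (PySem.List.pyGetD img (4 - i) []) column b))
    image

-- ===== PRECONDITION & SPEC =====
-- Pre_ = exactly the inputs on which A returns: at least 5 rows, and `column` a valid
-- (possibly negative) Python index into each of the first 5 rows; otherwise A raises IndexError.
def Pre_flipColumn (column : Int) (image : List (List Int)) : Prop :=
  5 ≤ image.length ∧ ∀ r ∈ image.take 5, PySem.Raise.InRange r.length column

instance (column : Int) (image : List (List Int)) : Decidable (Pre_flipColumn column image) := by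
  unfold Pre_flipColumn; infer_instance

def pvWitness_flipColumn : Int × List (List Int) := (0, [[1], [2], [3], [4], [5]])

def Spec_flipColumn (column : Int) (image : List (List Int)) (out : List (List Int)) : Prop := out = flipColumn_alt column image
instance (column : Int) (image : List (List Int)) (out : List (List Int)) : Decidable (Spec_flipColumn column image out) := by unfold Spec_flipColumn; infer_instance

-- ===== CLAIM (what is proved, stated in full; the proofs are below) =====
def Claim_equal_flipColumn : Prop := ∀ (column : Int) (image : List (List Int)), Dom_flipColumn column image → Pre_flipColumn column image → Spec_flipColumn column image (flipColumn column image)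

-- ===== LEMMAS AND PROOFS =====

-- Writing back the element already sitting at a valid (possibly negative) index is a no-op.
theorem pySetD_pyGetD_self (xs : List Int) (i : Int) (h : PySem.Raise.InRange xs.length i) :
    PySem.List.pySetD xs i (PySem.List.pyGetD xs i 0) = xs := by
  unfold PySem.Raise.InRange at h
  simp only [PySem.List.pySetD, PySem.List.pySet?, PySem.List.pyGetD, PySem.List.pyGet?,
    PySem.List.pyIdx?]
  by_cases h0 : 0 ≤ i
  · have hi : i < (xs.length : Int) := h.2
    simp [h0, hi]
  · have hi : -(xs.length : Int) ≤ i := h.1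
    have hk : xs.length - (-i).toNat < xs.length := by omega
    simp [h0, hi, List.getElem?_eq_getElem hk]

-- A's first loop: the collected column is the list of the 5 column entries.
theorem flipColumn_colLoop (c : Int) (r0 r1 r2 r3 r4 : List Int) (rest : List (List Int)) :
    (PySem.List.pyRange 0 5 1).foldl
      (fun col row =>
        PySem.List.pySetD col row
          (PySem.List.pyGetD (PySem.List.pyGetD (r0::r1::r2::r3::r4::rest) row []) c 0))
      [0, 0, 0, 0, 0] =
    [PySem.List.pyGetD r0 c 0, PySem.List.pyGetD r1 c 0, PySem.List.pyGetD r2 c 0,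
     PySem.List.pyGetD r3 c 0, PySem.List.pyGetD r4 c 0] := by
  have h5 : PySem.List.pyRange 0 5 1 = [((0:Nat):Int), ((1:Nat):Int), ((2:Nat):Int), ((3:Nat):Int), ((4:Nat):Int)] := by decide
  simp only [h5, List.foldl, PySem.List.pySetD_natCast, PySem.List.pyGetD_natCast]
  simp

-- A's second loop: writing a fixed 5-element column back into the first 5 rows.
theorem flipColumn_writeLoop (c : Int) (r0 r1 r2 r3 r4 : List Int) (rest : List (List Int))
    (a b d e f : Int) :
    (PySem.List.pyRange 0 5 1).foldl
      (fun img row =>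
        PySem.List.pySetD img row
          (PySem.List.pySetD (PySem.List.pyGetD img row []) c
            (PySem.List.pyGetD [a, b, d, e, f] row 0)))
      (r0::r1::r2::r3::r4::rest) =
    PySem.List.pySetD r0 c a :: PySem.List.pySetD r1 c b :: PySem.List.pySetD r2 c d ::
    PySem.List.pySetD r3 c e :: PySem.List.pySetD r4 c f :: rest := by
  have h5 : PySem.List.pyRange 0 5 1 = [((0:Nat):Int), ((1:Nat):Int), ((2:Nat):Int), ((3:Nat):Int), ((4:Nat):Int)] := by decide
  simp only [h5, List.foldl, PySem.List.pySetD_natCast, PySem.List.pyGetD_natCast]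
  simp

-- B's swap loop, in closed form: rows 0<->4 and 1<->3 exchanged, row 2 untouched.
theorem flipColumn_alt_closed (c : Int) (r0 r1 r2 r3 r4 : List Int) (rest : List (List Int)) :
    flipColumn_alt c (r0::r1::r2::r3::r4::rest) =
    PySem.List.pySetD r0 c (PySem.List.pyGetD r4 c 0) ::
    PySem.List.pySetD r1 c (PySem.List.pyGetD r3 c 0) :: r2 ::
    PySem.List.pySetD r3 c (PySem.List.pyGetD r1 c 0) ::
    PySem.List.pySetD r4 c (PySem.List.pyGetD r0 c 0) :: rest := by
  have h2r : PySem.List.pyRange 0 2 1 = [((0:Nat):Int), ((1:Nat):Int)] := by decide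
  unfold flipColumn_alt
  simp only [h2r, List.foldl,
    show ((4:Int) - ((0:Nat):Int)) = ((4:Nat):Int) by norm_num,
    show ((4:Int) - ((1:Nat):Int)) = ((3:Nat):Int) by norm_num,
    PySem.List.pySetD_natCast, PySem.List.pyGetD_natCast]
  simp

-- ===== VERDICT (by name: the statement is the Claim_ definition above) =====
theorem flipColumn_spec : Claim_equal_flipColumn := by
  intro column image _ hpre
  obtain ⟨hlen, hcol⟩ := hpre
  obtain ⟨r0, r1, r2, r3, r4, rest, rfl⟩ :
      ∃ r0 r1 r2 r3 r4 rest, image = r0 :: r1 :: r2 :: r3 :: r4 :: rest := by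
    match image, hlen with
    | r0 :: r1 :: r2 :: r3 :: r4 :: rest, _ => exact ⟨r0, r1, r2, r3, r4, rest, rfl⟩
  have h2 : PySem.Raise.InRange r2.length column := by
    apply hcol; simp [List.take]
  unfold Spec_flipColumn flipColumn
  simp only [flipColumn_colLoop]
  have hrev : ([PySem.List.pyGetD r0 column 0, PySem.List.pyGetD r1 column 0,
      PySem.List.pyGetD r2 column 0, PySem.List.pyGetD r3 column 0,
      PySem.List.pyGetD r4 column 0] : List Int).reverse =
      [PySem.List.pyGetD r4 column 0, PySem.List.pyGetD r3 column 0,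
       PySem.List.pyGetD r2 column 0, PySem.List.pyGetD r1 column 0,
       PySem.List.pyGetD r0 column 0] := by simp
  rw [hrev, flipColumn_writeLoop, flipColumn_alt_closed, pySetD_pyGetD_self r2 column h2]
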